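-- pv_equiv track=rewrite | github.com/mosipamo/Data-Structures-and-Algorithms-Course | CA1/misaghi.py | solve
-- ===== SOURCE A (Python) =====
-- def solve(a, b, s):
--     if not s:
--         return True
--
--     c = a + b
--     c_str = str(c)
--
--     if s.startswith(c_str):
--         return solve(b, c, s[len(c_str):])
--
--     return False
-- ===== SOURCE B (Python) =====
-- def solve(a, b, s):
--     # Build the Fibonacci-like concatenation greedily until it is at least
--     # as long as s, then compare once for equality.
--     t = ""
--     x, y = a, b
--     while len(t) < len(s):
--         x, y = y, x + y
--         t += str(y)
--     return t == s
-- ===== Notes on version B (the rewrite author's own statement) =====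
-- stated objective: alternative
-- what changed: B replaces the prefix-test-and-recurse structure by a generate-then-compare loop: it builds the concatenation of successive Fibonacci terms until it reaches the length of s and compares once at the end, instead of testing startswith and slicing at every step.
import Mathlib
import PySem

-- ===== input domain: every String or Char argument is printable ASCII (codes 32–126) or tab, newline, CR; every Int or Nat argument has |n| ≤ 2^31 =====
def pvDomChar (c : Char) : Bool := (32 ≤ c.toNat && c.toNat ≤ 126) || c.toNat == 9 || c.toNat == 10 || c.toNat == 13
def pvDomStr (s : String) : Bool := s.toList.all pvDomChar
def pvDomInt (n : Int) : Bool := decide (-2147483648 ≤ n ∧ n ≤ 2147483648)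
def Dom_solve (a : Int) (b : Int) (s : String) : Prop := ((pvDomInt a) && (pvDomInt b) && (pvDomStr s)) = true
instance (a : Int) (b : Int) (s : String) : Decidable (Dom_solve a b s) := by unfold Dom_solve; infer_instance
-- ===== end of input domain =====

-- B builds the whole Fibonacci-like concatenation up to the length of s and compares once,
-- instead of A's per-step prefix test and slice; objective: alternative decomposition.

-- needed by both ports' termination proofs: str(n) is never empty
theorem pvToCharsLenPos (n : Int) : 0 < (PySem.Int.toChars n).length := by
  unfold PySem.Int.toChars
  split <;> simp [Nat.length_toDigits_pos]

-- ===== PORT A =====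
-- A's tail recursion: test startswith(str(a+b)), slice it off, recurse with (b, a+b)
def solveGoA (a b : Int) (cs : List Char) : Bool :=
  if cs = [] then true
  else
    let cstr := PySem.Int.toChars (a + b)
    if PySem.Chars.startswith cs cstr then
      solveGoA b (a + b) (cs.drop cstr.length)
    else false
termination_by cs.length
decreasing_by
  rename_i h _
  have h1 := pvToCharsLenPos (a + b)
  have h2 : 0 < cs.length := List.length_pos_iff.mpr h
  simp only [List.length_drop]; omega

def solve (a : Int) (b : Int) (s : String) : Bool := solveGoA a b s.toList

-- ===== PORT B =====
-- B's while loop: append str(x+y) to t while len(t) < len(target)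
def solveGoB (x y : Int) (t target : List Char) : List Char :=
  if t.length < target.length then
    solveGoB y (x + y) (t ++ PySem.Int.toChars (x + y)) target
  else t
termination_by target.length - t.length
decreasing_by
  have h1 := pvToCharsLenPos (x + y)
  simp only [List.length_append]; omega

def solve_alt (a : Int) (b : Int) (s : String) : Bool := solveGoB a b [] s.toList == s.toList

-- ===== PRECONDITION & SPEC =====
def Spec_solve (a : Int) (b : Int) (s : String) (out : Bool) : Prop := out = solve_alt a b s
instance (a : Int) (b : Int) (s : String) (out : Bool) : Decidable (Spec_solve a b s out) := by unfold Spec_solve; infer_instance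

-- ===== CLAIM (what is proved, stated in full; the proofs are below) =====
def Claim_equal_solve : Prop := ∀ (a : Int) (b : Int) (s : String), Dom_solve a b s → Spec_solve a b s (solve a b s)

-- ===== LEMMAS AND PROOFS =====

-- B's loop only ever appends to its accumulator
theorem solveGoB_prefix : ∀ (n : Nat) (x y : Int) (t target : List Char),
    target.length - t.length ≤ n → ∃ u, solveGoB x y t target = t ++ u := by
  intro n
  induction n with
  | zero =>
    intro x y t target hn
    rw [solveGoB.eq_def, if_neg (by omega)]
    exact ⟨[], by simp⟩
  | succ n ih =>
    intro x y t target hn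
    rw [solveGoB.eq_def]
    by_cases h : t.length < target.length
    · rw [if_pos h]
      obtain ⟨u, hu⟩ := ih y (x + y) (t ++ PySem.Int.toChars (x + y)) target
        (by have := pvToCharsLenPos (x + y); simp only [List.length_append]; omega)
      exact ⟨PySem.Int.toChars (x + y) ++ u, by rw [hu, List.append_assoc]⟩
    · rw [if_neg h]
      exact ⟨[], by simp⟩

-- translating the loop state by an already-matched prefix p
theorem solveGoB_shift (p : List Char) : ∀ (n : Nat) (x y : Int) (t target : List Char),
    target.length - t.length ≤ n →
    solveGoB x y (p ++ t) (p ++ target) = p ++ solveGoB x y t target := by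
  intro n
  induction n with
  | zero =>
    intro x y t target hn
    conv_lhs => rw [solveGoB.eq_def]
    conv_rhs => rw [solveGoB.eq_def]
    simp only [List.length_append]
    rw [if_neg (by omega), if_neg (by omega)]
  | succ n ih =>
    intro x y t target hn
    conv_lhs => rw [solveGoB.eq_def]
    conv_rhs => rw [solveGoB.eq_def]
    simp only [List.length_append]
    by_cases h : t.length < target.length
    · rw [if_pos (by omega), if_pos h, List.append_assoc]
      have hc := pvToCharsLenPos (x + y)
      exact ih y (x + y) (t ++ PySem.Int.toChars (x + y)) target
        (by simp only [List.length_append]; omega)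
    · rw [if_neg (by omega), if_neg h]

theorem solve_main : ∀ (n : Nat) (cs : List Char) (a b : Int), cs.length ≤ n →
    solveGoA a b cs = (solveGoB a b [] cs == cs) := by
  intro n
  induction n with
  | zero =>
    intro cs a b hn
    have hcs : cs = [] := List.eq_nil_of_length_eq_zero (by omega)
    subst hcs
    rw [solveGoA, solveGoB.eq_def]; simp
  | succ n ih =>
    intro cs a b hn
    by_cases hcs : cs = []
    · subst hcs; rw [solveGoA, solveGoB.eq_def]; simp
    · have hpos : 0 < cs.length := List.length_pos_iff.mpr hcs
      rw [solveGoA, if_neg hcs]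
      conv_rhs => rw [solveGoB.eq_def,
        if_pos (show ([] : List Char).length < cs.length by simpa using hpos)]
      simp only [List.nil_append]
      set cstr := PySem.Int.toChars (a + b) with hcstr
      have hclen : 0 < cstr.length := by rw [hcstr]; exact pvToCharsLenPos (a + b)
      by_cases hsw : PySem.Chars.startswith cs cstr = true
      · rw [if_pos hsw]
        obtain ⟨cs', hcs'⟩ := (PySem.Chars.startswith_iff cs cstr).mp hsw
        have hdrop : cs.drop cstr.length = cs' := by rw [← hcs']; simp
        rw [hdrop]
        have hshift := solveGoB_shift cstr cs'.length b (a + b) [] cs' (by simp)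
        simp only [List.append_nil] at hshift
        rw [← hcs', hshift]
        have hbeq : (cstr ++ solveGoB b (a + b) [] cs' == cstr ++ cs')
            = (solveGoB b (a + b) [] cs' == cs') := by
          rw [Bool.eq_iff_iff, beq_iff_eq, beq_iff_eq, List.append_cancel_left_eq]
        rw [hbeq]
        have hlen' : cs'.length ≤ n := by
          have : cs.length = cstr.length + cs'.length := by rw [← hcs']; simp
          omega
        exact ih cs' b (a + b) hlen'
      · rw [if_neg hsw]
        obtain ⟨u, hu⟩ := solveGoB_prefix cs.length b (a + b) cstr cs (by omega)
        rw [hu]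
        symm
        rw [beq_eq_false_iff_ne]
        intro hc
        exact hsw ((PySem.Chars.startswith_iff cs cstr).mpr ⟨u, hc⟩)

-- ===== VERDICT (by name: the statement is the Claim_ definition above) =====
theorem solve_spec : Claim_equal_solve := by
  intro a b s _
  unfold Spec_solve solve solve_alt
  exact solve_main s.toList.length s.toList a b (le_refl _)
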